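-- pv_equiv track=rewrite | github.com/ahinkim/BOJ | BOJ/구현 - 시뮬레이션/BOJ20436.py | find_loc
-- ===== SOURCE A (Python) =====
-- def find_loc(s):
--     i, j = 0, 0
--     for x in keyboard:
--         j = 0
--         for y in x:
--             if y == s:
--                 return i, j
--             j += 1
--         i += 1
--
-- keyboard = ['qwertyuiop', 'asdfghjkl', 'zxcvbnm']
-- ===== SOURCE B (Python) =====
-- keyboard = ['qwertyuiop', 'asdfghjkl', 'zxcvbnm']
--
-- # index built once: char -> (row, col)
-- pos = {c: (i, j) for i, row in enumerate(keyboard) for j, c in enumerate(row)}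
--
-- def find_loc(s):
--     return pos.get(s)
-- ===== Notes on version B (the rewrite author's own statement) =====
-- stated objective: idiomatic
-- what changed: replaced the nested query-time scan over keyboard rows by a module-level precomputed dict mapping each character to its (row, col), so the query is a single lookup
import Mathlib
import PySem

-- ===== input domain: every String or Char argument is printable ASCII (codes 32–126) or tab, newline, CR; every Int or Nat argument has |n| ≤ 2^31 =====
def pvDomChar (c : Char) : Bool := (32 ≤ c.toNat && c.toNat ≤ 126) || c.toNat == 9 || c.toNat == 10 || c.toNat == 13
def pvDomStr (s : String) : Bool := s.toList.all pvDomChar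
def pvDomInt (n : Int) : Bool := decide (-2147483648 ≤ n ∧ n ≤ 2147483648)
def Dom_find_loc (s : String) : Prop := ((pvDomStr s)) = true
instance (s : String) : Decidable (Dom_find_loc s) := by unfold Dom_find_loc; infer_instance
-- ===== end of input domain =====

-- B replaces A's nested query-time scan by a dict index built once from the keyboard, queried with .get (idiomatic).

-- ===== PORT A =====
def keyboardA : List String := ["qwertyuiop", "asdfghjkl", "zxcvbnm"]

-- inner 'for y in x' loop of A (y is a one-character string in Python)
def findRowA (s : String) (cs : List Char) (i j : Int) : Option (Int × Int) :=
  match cs with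
  | [] => none
  | y :: ys => if String.singleton y == s then some (i, j) else findRowA s ys i (j + 1)

-- outer 'for x in keyboard' loop of A
def findRowsA (s : String) (rows : List String) (i : Int) : Option (Int × Int) :=
  match rows with
  | [] => none
  | x :: xs =>
    match findRowA s x.toList i 0 with
    | some r => some r
    | none => findRowsA s xs (i + 1)

def find_loc (s : String) : Option (Int × Int) := findRowsA s keyboardA 0

-- ===== PORT B =====
def keyboardB : List String := ["qwertyuiop", "asdfghjkl", "zxcvbnm"]

-- pos = {c: (i, j) for i, row in enumerate(keyboard) for j, c in enumerate(row)}
def posB : PySem.Dict String (Int × Int) :=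
  PySem.Dict.ofList
    ((PySem.List.enumerate keyboardB).flatMap (fun p =>
      (PySem.List.enumerate p.2.toList).map (fun q => (String.singleton q.2, (p.1, q.1)))))

def find_loc_alt (s : String) : Option (Int × Int) := posB.get? s

-- ===== PRECONDITION & SPEC =====
def Spec_find_loc (s : String) (out : Option (Int × Int)) : Prop := out = find_loc_alt s
instance (s : String) (out : Option (Int × Int)) : Decidable (Spec_find_loc s out) := by unfold Spec_find_loc; infer_instance

-- ===== CLAIM (what is proved, stated in full; the proofs are below) =====
def Claim_equal_find_loc : Prop := ∀ (s : String), Dom_find_loc s → Spec_find_loc s (find_loc s)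

-- ===== LEMMAS AND PROOFS =====

-- ===== VERDICT (by name: the statement is the Claim_ definition above) =====
theorem find_loc_spec : Claim_equal_find_loc := by
  intro s _
  unfold Spec_find_loc find_loc find_loc_alt
  have hq : "qwertyuiop".toList = ['q','w','e','r','t','y','u','i','o','p'] := by decide
  have ha : "asdfghjkl".toList = ['a','s','d','f','g','h','j','k','l'] := by decide
  have hz : "zxcvbnm".toList = ['z','x','c','v','b','n','m'] := by decide
  simp only [keyboardA, keyboardB, posB, findRowsA, findRowA, hq, ha, hz,
    PySem.List.enumerate_cons, PySem.List.enumerate_nil,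
    List.flatMap_cons, List.flatMap_nil, List.map_cons, List.map_nil, List.append_nil,
    PySem.Dict.ofList, PySem.Dict.update, List.cons_append, List.nil_append,
    List.foldl_cons, List.foldl_nil,
    PySem.Dict.get?_insert, String.singleton, beq_iff_eq]
  by_cases h1 : s = "".push 'q'
  · subst h1; decide
  rw [if_neg h1, if_neg (fun e => h1 e.symm)]
  by_cases h2 : s = "".push 'w'
  · subst h2; decide
  rw [if_neg h2, if_neg (fun e => h2 e.symm)]
  by_cases h3 : s = "".push 'e'
  · subst h3; decide
  rw [if_neg h3, if_neg (fun e => h3 e.symm)]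
  by_cases h4 : s = "".push 'r'
  · subst h4; decide
  rw [if_neg h4, if_neg (fun e => h4 e.symm)]
  by_cases h5 : s = "".push 't'
  · subst h5; decide
  rw [if_neg h5, if_neg (fun e => h5 e.symm)]
  by_cases h6 : s = "".push 'y'
  · subst h6; decide
  rw [if_neg h6, if_neg (fun e => h6 e.symm)]
  by_cases h7 : s = "".push 'u'
  · subst h7; decide
  rw [if_neg h7, if_neg (fun e => h7 e.symm)]
  by_cases h8 : s = "".push 'i'
  · subst h8; decide
  rw [if_neg h8, if_neg (fun e => h8 e.symm)]
  by_cases h9 : s = "".push 'o'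
  · subst h9; decide
  rw [if_neg h9, if_neg (fun e => h9 e.symm)]
  by_cases h10 : s = "".push 'p'
  · subst h10; decide
  rw [if_neg h10, if_neg (fun e => h10 e.symm)]
  by_cases h11 : s = "".push 'a'
  · subst h11; decide
  rw [if_neg h11, if_neg (fun e => h11 e.symm)]
  by_cases h12 : s = "".push 's'
  · subst h12; decide
  rw [if_neg h12, if_neg (fun e => h12 e.symm)]
  by_cases h13 : s = "".push 'd'
  · subst h13; decide
  rw [if_neg h13, if_neg (fun e => h13 e.symm)]
  by_cases h14 : s = "".push 'f'
  · subst h14; decide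
  rw [if_neg h14, if_neg (fun e => h14 e.symm)]
  by_cases h15 : s = "".push 'g'
  · subst h15; decide
  rw [if_neg h15, if_neg (fun e => h15 e.symm)]
  by_cases h16 : s = "".push 'h'
  · subst h16; decide
  rw [if_neg h16, if_neg (fun e => h16 e.symm)]
  by_cases h17 : s = "".push 'j'
  · subst h17; decide
  rw [if_neg h17, if_neg (fun e => h17 e.symm)]
  by_cases h18 : s = "".push 'k'
  · subst h18; decide
  rw [if_neg h18, if_neg (fun e => h18 e.symm)]
  by_cases h19 : s = "".push 'l'
  · subst h19; decide
  rw [if_neg h19, if_neg (fun e => h19 e.symm)]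
  by_cases h20 : s = "".push 'z'
  · subst h20; decide
  rw [if_neg h20, if_neg (fun e => h20 e.symm)]
  by_cases h21 : s = "".push 'x'
  · subst h21; decide
  rw [if_neg h21, if_neg (fun e => h21 e.symm)]
  by_cases h22 : s = "".push 'c'
  · subst h22; decide
  rw [if_neg h22, if_neg (fun e => h22 e.symm)]
  by_cases h23 : s = "".push 'v'
  · subst h23; decide
  rw [if_neg h23, if_neg (fun e => h23 e.symm)]
  by_cases h24 : s = "".push 'b'
  · subst h24; decide
  rw [if_neg h24, if_neg (fun e => h24 e.symm)]
  by_cases h25 : s = "".push 'n'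
  · subst h25; decide
  rw [if_neg h25, if_neg (fun e => h25 e.symm)]
  by_cases h26 : s = "".push 'm'
  · subst h26; decide
  rw [if_neg h26, if_neg (fun e => h26 e.symm)]
  simp [PySem.Dict.get?, PySem.Dict.empty]
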